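-- pv_equiv track=rewrite | github.com/EliahKagan/old-practice-snapshot | main/components-in-a-graph/components-in-a-graph-dfs.py | nonsingelton_component_sizes
-- ===== SOURCE A (Python) =====
-- def nonsingelton_component_sizes(adj):
--     """Yields sizes of each graph component with more than one vertex."""
--     vis = [False] * len(adj)
--
--     def measure(src):
--         if vis[src]:
--             return 0
--         vis[src] = True
--         return 1 + sum(measure(dest) for dest in adj[src])
--
--     for src in range(len(adj)):
--         size = measure(src)
--         if size > 1:
--             yield size
-- ===== SOURCE B (Python) =====
-- def nonsingelton_component_sizes(adj):
--     """Yields sizes of each graph component with more than one vertex."""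
--     vis = [False] * len(adj)
--     for src in range(len(adj)):
--         count = 0
--         stack = [src]
--         while stack:
--             node = stack.pop()
--             if vis[node]:
--                 continue
--             vis[node] = True
--             count += 1
--             stack.extend(reversed(adj[node]))
--         if count > 1:
--             yield count
-- ===== Notes on version B (the rewrite author's own statement) =====
-- stated objective: alternative
-- what changed: The recursive measure() helper (recursion + sum over a generator) is replaced by an iterative DFS with an explicit stack inside the outer loop, keeping the same visited array and yield order.
import Mathlib
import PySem

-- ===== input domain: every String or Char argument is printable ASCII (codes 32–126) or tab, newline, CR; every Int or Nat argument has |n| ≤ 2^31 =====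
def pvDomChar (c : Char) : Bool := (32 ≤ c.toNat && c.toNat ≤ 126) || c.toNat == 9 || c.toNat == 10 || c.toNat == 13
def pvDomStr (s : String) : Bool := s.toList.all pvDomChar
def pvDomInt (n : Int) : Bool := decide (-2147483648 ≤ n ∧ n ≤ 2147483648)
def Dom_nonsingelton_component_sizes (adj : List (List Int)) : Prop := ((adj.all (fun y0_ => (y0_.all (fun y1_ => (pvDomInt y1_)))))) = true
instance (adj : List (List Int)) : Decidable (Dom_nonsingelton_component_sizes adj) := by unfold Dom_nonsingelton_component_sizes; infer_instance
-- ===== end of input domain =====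

-- B replaces A's recursive measure() helper by an iterative explicit-stack DFS (same visited
-- array, same yield order); equivalence is about the returned (yielded) values.

-- ===== PORT A =====
-- A's recursive `measure` (and the generator sum over adj[src]), threaded through the mutated
-- `vis` list; the Nat fuel is only a totality guard (under Pre_ the recursion depth is bounded
-- by the number of unvisited vertices, so fuel = len(adj)+1 is never exhausted).
mutual
def pvMeasureA (adj : List (List Int)) : Nat → Int → List Bool → Int × List Bool
  | 0, _, vis => (0, vis)                      -- fuel guard, never reached under Pre_
  | Nat.succ fuel, src, vis =>
    match PySem.List.pyGet? vis src with
    | none => (0, vis)                         -- IndexError in Python; excluded by Pre_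
    | some true => (0, vis)
    | some false =>
      let vis1 := PySem.List.pySetD vis src true
      match PySem.List.pyGet? adj src with
      | none => (1, vis1)                      -- IndexError in Python; excluded by Pre_
      | some ns =>
        let p := pvMeasureListA adj fuel ns vis1
        (1 + p.1, p.2)
termination_by fuel _ _ => (fuel, 0)
-- the generator sum, left to right over adj[src]
def pvMeasureListA (adj : List (List Int)) : Nat → List Int → List Bool → Int × List Bool
  | _, [], vis => (0, vis)
  | fuel, d :: rest, vis =>
    let p := pvMeasureA adj fuel d vis
    let q := pvMeasureListA adj fuel rest p.2
    (p.1 + q.1, q.2)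
termination_by fuel l _ => (fuel, l.length + 1)
end

def nonsingelton_component_sizes (adj : List (List Int)) : List Int :=
  ((PySem.List.pyRange 0 adj.length 1).foldl
      (fun (st : List Int × List Bool) src =>
        let p := pvMeasureA adj (adj.length + 1) src st.2
        if p.1 > 1 then (st.1 ++ [p.1], p.2) else (st.1, p.2))
      ([], List.replicate adj.length false)).1

-- ===== PORT B =====
-- count of unvisited vertices: termination measure of the while loop (cited in decreasing_by)
def pvUnvis (vis : List Bool) : Nat := vis.count false

theorem pvCount_set_true (vis : List Bool) (j : Nat) (h : vis[j]? = some false) :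
    (vis.set j true).count false + 1 = vis.count false := by
  induction vis generalizing j with
  | nil => simp at h
  | cons b tl ih =>
    cases j with
    | zero => simp_all [List.count_cons]
    | succ j =>
      simp only [List.getElem?_cons_succ] at h
      have := ih j h
      cases b <;> simp [List.count_cons] <;> omega

theorem pvUnvis_lt (vis : List Bool) (i : Int) (h : PySem.List.pyGet? vis i = some false) :
    pvUnvis (PySem.List.pySetD vis i true) < pvUnvis vis := by
  unfold PySem.List.pyGet? at h
  cases hidx : PySem.List.pyIdx? vis.length i with
  | none => simp [hidx] at h
  | some j =>
    simp only [hidx, Option.bind_some] at h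
    simp only [PySem.List.pySetD, PySem.List.pySet?, hidx, Option.map_some, Option.getD_some]
    have := pvCount_set_true vis j h
    unfold pvUnvis; omega

-- the Python `while stack:` loop; the Lean list's head is the TOP of the Python stack
-- (Python pops from the end and pushes reversed(adj[node]), so the popping order is adj[node]
-- left to right, i.e. `ns ++ rest` in top-first representation)
def pvLoopB (adj : List (List Int)) : List Int → List Bool → Int → Int × List Bool
  | [], vis, c => (c, vis)
  | node :: rest, vis, c =>
    match h : PySem.List.pyGet? vis node with
    | none => (c, vis)                         -- IndexError in Python; excluded by Pre_
    | some true => pvLoopB adj rest vis c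
    | some false =>
      let vis1 := PySem.List.pySetD vis node true
      match PySem.List.pyGet? adj node with
      | none => (c + 1, vis1)                  -- IndexError in Python; excluded by Pre_
      | some ns => pvLoopB adj (ns ++ rest) vis1 (c + 1)
termination_by stack vis _ => (pvUnvis vis, stack.length)
decreasing_by
  · exact Prod.Lex.right _ (by simp)
  · exact Prod.Lex.left _ _ (pvUnvis_lt _ _ h)

def nonsingelton_component_sizes_alt (adj : List (List Int)) : List Int :=
  ((PySem.List.pyRange 0 adj.length 1).foldl
      (fun (st : List Int × List Bool) src =>
        let p := pvLoopB adj [src] st.2 0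
        if p.1 > 1 then (st.1 ++ [p.1], p.2) else (st.1, p.2))
      ([], List.replicate adj.length false)).1

-- ===== PRECONDITION & SPEC =====
-- Pre_ excludes exactly the adjacency lists with an entry outside [-len, len), on which the
-- Python raises IndexError; negative in-range entries (Python wraparound) are kept.
def Pre_nonsingelton_component_sizes (adj : List (List Int)) : Prop :=
  ∀ row ∈ adj, ∀ d ∈ row, -(adj.length : Int) ≤ d ∧ d < adj.length
instance (adj : List (List Int)) : Decidable (Pre_nonsingelton_component_sizes adj) := by
  unfold Pre_nonsingelton_component_sizes; infer_instance

def pvWitness_nonsingelton_component_sizes : List (List Int) := [[1], [0], []]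

def Spec_nonsingelton_component_sizes (adj : List (List Int)) (out : List Int) : Prop :=
  out = nonsingelton_component_sizes_alt adj
instance (adj : List (List Int)) (out : List Int) : Decidable (Spec_nonsingelton_component_sizes adj out) := by
  unfold Spec_nonsingelton_component_sizes; infer_instance

-- ===== CLAIM (what is proved, stated in full; the proofs are below) =====
def Claim_equal_nonsingelton_component_sizes : Prop := ∀ (adj : List (List Int)), Dom_nonsingelton_component_sizes adj → Pre_nonsingelton_component_sizes adj → Spec_nonsingelton_component_sizes adj (nonsingelton_component_sizes adj)

-- ===== LEMMAS AND PROOFS =====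

-- resolving a Python index that is in range
theorem pvResolve (len : Nat) (i : Int) (h1 : -(len : Int) ≤ i) (h2 : i < len) :
    ∃ j : Nat, j < len ∧ PySem.List.pyIdx? len i = some j := by
  unfold PySem.List.pyIdx?
  by_cases h0 : 0 ≤ i
  · rw [if_pos h0, if_pos h2]
    exact ⟨i.toNat, by omega, rfl⟩
  · rw [if_neg h0, if_pos h1]
    exact ⟨len - (-i).toNat, by omega, rfl⟩

theorem pvGet_of_idx {α : Type} (xs : List α) (i : Int) (j : Nat)
    (h : PySem.List.pyIdx? xs.length i = some j) :
    PySem.List.pyGet? xs i = xs[j]? := by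
  simp [PySem.List.pyGet?, h]

theorem pvLen_pySetD {α : Type} (xs : List α) (i : Int) (v : α) :
    (PySem.List.pySetD xs i v).length = xs.length := by
  cases hidx : PySem.List.pyIdx? xs.length i <;>
    simp [PySem.List.pySetD, PySem.List.pySet?, hidx]

-- monotonicity of A's measure: length preserved, unvisited count non-increasing
theorem pvMonoA (adj : List (List Int)) :
    ∀ fuel src vis, (pvMeasureA adj fuel src vis).2.length = vis.length ∧
      pvUnvis (pvMeasureA adj fuel src vis).2 ≤ pvUnvis vis := by
  intro fuel
  induction fuel with
  | zero => intro src vis; simp [pvMeasureA]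
  | succ f ihA =>
    have ihL : ∀ ns vis, (pvMeasureListA adj f ns vis).2.length = vis.length ∧
        pvUnvis (pvMeasureListA adj f ns vis).2 ≤ pvUnvis vis := by
      intro ns
      induction ns with
      | nil => intro vis; simp [pvMeasureListA]
      | cons d rest ihr =>
        intro vis
        obtain ⟨l1, u1⟩ := ihA d vis
        obtain ⟨l2, u2⟩ := ihr (pvMeasureA adj f d vis).2
        simp only [pvMeasureListA]
        exact ⟨by rw [l2, l1], le_trans u2 u1⟩
    intro src vis
    simp only [pvMeasureA]
    cases hg : PySem.List.pyGet? vis src with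
    | none => simp
    | some b =>
      cases b with
      | true => simp
      | false =>
        cases ha : PySem.List.pyGet? adj src with
        | none =>
          refine ⟨pvLen_pySetD vis src true, le_of_lt (pvUnvis_lt vis src hg)⟩
        | some ns =>
          obtain ⟨l1, u1⟩ := ihL ns (PySem.List.pySetD vis src true)
          refine ⟨by rw [l1, pvLen_pySetD], le_trans u1 (le_of_lt (pvUnvis_lt vis src hg))⟩

theorem pvMonoL (adj : List (List Int)) :
    ∀ fuel ns vis, (pvMeasureListA adj fuel ns vis).2.length = vis.length ∧
      pvUnvis (pvMeasureListA adj fuel ns vis).2 ≤ pvUnvis vis := by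
  intro fuel ns
  induction ns with
  | nil => intro vis; simp [pvMeasureListA]
  | cons d rest ihr =>
    intro vis
    obtain ⟨l1, u1⟩ := pvMonoA adj fuel d vis
    obtain ⟨l2, u2⟩ := ihr (pvMeasureA adj fuel d vis).2
    simp only [pvMeasureListA]
    exact ⟨by rw [l2, l1], le_trans u2 u1⟩

def pvGoodList (adj : List (List Int)) (ns : List Int) : Prop :=
  ∀ d ∈ ns, -(adj.length : Int) ≤ d ∧ d < adj.length

-- the bridge: the stack loop on `ns ++ stack` first performs A's recursive measure of ns
theorem pvMain (adj : List (List Int)) (hPre : Pre_nonsingelton_component_sizes adj) :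
    ∀ (N fuel : Nat) (ns stack : List Int) (vis : List Bool) (c : Int),
      pvUnvis vis ≤ N → pvGoodList adj ns → pvGoodList adj stack →
      vis.length = adj.length → pvUnvis vis < fuel →
      pvLoopB adj (ns ++ stack) vis c =
        pvLoopB adj stack (pvMeasureListA adj fuel ns vis).2
          (c + (pvMeasureListA adj fuel ns vis).1) := by
  intro N
  induction N using Nat.strong_induction_on with
  | _ N ihN =>
    intro fuel ns stack
    induction ns generalizing fuel with
    | nil =>
      intro vis c _ _ _ _ _
      simp [pvMeasureListA]
    | cons d rest ihr =>
      intro vis c hN hns hstack hlen hfuel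
      obtain ⟨f, rfl⟩ : ∃ f, fuel = f + 1 := ⟨fuel - 1, by omega⟩
      have hd := hns d (by simp)
      obtain ⟨j, hj, hidx⟩ := pvResolve adj.length d hd.1 hd.2
      have hidxv : PySem.List.pyIdx? vis.length d = some j := by rw [hlen]; exact hidx
      have hjv : j < vis.length := by omega
      have hsome : vis[j]? = some vis[j] := List.getElem?_eq_getElem hjv
      have hrest : pvGoodList adj rest := fun x hx => hns x (by simp [hx])
      cases hb : vis[j] with
      | true =>
        have hgs : PySem.List.pyGet? vis d = some true := by
          rw [pvGet_of_idx vis d j hidxv, hsome, hb]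
        have lhs : pvLoopB adj ((d :: rest) ++ stack) vis c
            = pvLoopB adj (rest ++ stack) vis c := by
          simp only [List.cons_append, pvLoopB]
          split <;> simp_all
        rw [lhs, ihr (f + 1) vis c hN hrest hstack hlen hfuel]
        simp only [pvMeasureListA, pvMeasureA, hgs]
        norm_num
      | false =>
        have hgs : PySem.List.pyGet? vis d = some false := by
          rw [pvGet_of_idx vis d j hidxv, hsome, hb]
        have hga : PySem.List.pyGet? adj d = some adj[j] := by
          rw [pvGet_of_idx adj d j hidx]
          exact List.getElem?_eq_getElem hj
        have lhs : pvLoopB adj ((d :: rest) ++ stack) vis c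
            = pvLoopB adj (adj[j] ++ (rest ++ stack)) (PySem.List.pySetD vis d true) (c + 1) := by
          simp only [List.cons_append, pvLoopB]
          split <;> simp_all
        set vis1 := PySem.List.pySetD vis d true with hvis1
        have hlen1 : vis1.length = adj.length := by rw [hvis1, pvLen_pySetD, hlen]
        have hu1 : pvUnvis vis1 < pvUnvis vis := pvUnvis_lt vis d hgs
        have hgood' : pvGoodList adj adj[j] := by
          intro x hx
          exact hPre adj[j] (List.getElem_mem hj) x hx
        have hgoodrs : pvGoodList adj (rest ++ stack) := by
          intro x hx
          rcases List.mem_append.mp hx with h | h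
          · exact hrest x h
          · exact hstack x h
        set P1 := pvMeasureListA adj f adj[j] vis1 with hP1
        have step1 : pvLoopB adj (adj[j] ++ (rest ++ stack)) vis1 (c + 1)
            = pvLoopB adj (rest ++ stack) P1.2 ((c + 1) + P1.1) :=
          ihN (pvUnvis vis1) (by omega) f adj[j] (rest ++ stack) vis1 (c + 1)
            (le_refl _) hgood' hgoodrs hlen1 (by omega)
        obtain ⟨lP1, uP1⟩ := pvMonoL adj f adj[j] vis1
        rw [← hP1] at lP1 uP1
        set P2 := pvMeasureListA adj (f + 1) rest P1.2 with hP2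
        have step2 : pvLoopB adj (rest ++ stack) P1.2 ((c + 1) + P1.1)
            = pvLoopB adj stack P2.2 (((c + 1) + P1.1) + P2.1) :=
          ihN (pvUnvis P1.2) (by omega) (f + 1) rest stack P1.2 ((c + 1) + P1.1)
            (le_refl _) hrest hstack (by rw [lP1, hlen1]) (by omega)
        rw [lhs, step1, step2]
        simp only [pvMeasureListA, pvMeasureA, hgs, hga, ← hvis1, ← hP1, ← hP2]
        congr 1
        ring
  
-- ===== VERDICT (by name: the statement is the Claim_ definition above) =====
theorem nonsingelton_component_sizes_spec : Claim_equal_nonsingelton_component_sizes := by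
  intro adj _ hPre
  unfold Spec_nonsingelton_component_sizes
  unfold nonsingelton_component_sizes nonsingelton_component_sizes_alt
  have key : ∀ (l : List Int), (∀ s ∈ l, (0:Int) ≤ s ∧ s < adj.length) →
      ∀ (out : List Int) (vis : List Bool), vis.length = adj.length →
      l.foldl (fun (st : List Int × List Bool) src =>
          let p := pvMeasureA adj (adj.length + 1) src st.2
          if p.1 > 1 then (st.1 ++ [p.1], p.2) else (st.1, p.2)) (out, vis)
      = l.foldl (fun (st : List Int × List Bool) src =>
          let p := pvLoopB adj [src] st.2 0
          if p.1 > 1 then (st.1 ++ [p.1], p.2) else (st.1, p.2)) (out, vis) := by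
    intro l
    induction l with
    | nil => intro _ _ _ _; rfl
    | cons s t ih =>
      intro hl out vis hlen
      have hs := hl s (by simp)
      have hone : pvGoodList adj [s] := by
        intro x hx
        simp at hx
        subst hx
        exact ⟨by omega, hs.2⟩
      have hmain := pvMain adj hPre (pvUnvis vis) (adj.length + 1) [s] [] vis 0
        (le_refl _) hone (by intro x hx; simp at hx) hlen
        (by have := List.count_le_length (l := vis) (a := false); unfold pvUnvis; omega)
      simp only [List.append_nil] at hmain
      have hlist : pvMeasureListA adj (adj.length + 1) [s] vis
          = ((pvMeasureA adj (adj.length + 1) s vis).1,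
             (pvMeasureA adj (adj.length + 1) s vis).2) := by
        simp [pvMeasureListA]
      have heq : pvLoopB adj [s] vis 0 = pvMeasureA adj (adj.length + 1) s vis := by
        rw [hmain, hlist]
        simp [pvLoopB]
      simp only [List.foldl_cons, heq]
      obtain ⟨lA, -⟩ := pvMonoA adj (adj.length + 1) s vis
      have hlen' : (pvMeasureA adj (adj.length + 1) s vis).2.length = adj.length := by
        rw [lA, hlen]
      split <;>
        exact ih (fun x hx => hl x (by simp [hx])) _ _ hlen'
  rw [key (PySem.List.pyRange 0 adj.length 1)
      (fun s hs => by
        have := (PySem.List.mem_pyRange_one).mp hs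
        exact ⟨this.1, this.2⟩)
      [] (List.replicate adj.length false) (by simp)]
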